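-- pv_equiv track=rewrite | github.com/SimonOuellette35/GridCoder2024 | Hodel_primitives_full_trainingV2.py | underpaint
-- ===== SOURCE A (Python) =====
-- def underpaint(grid, obj):
--     """ paint object to grid where there is background """
--     h, w = len(grid), len(grid[0])
--     bg = 0
--     grid_painted = list(list(row) for row in grid)
--     for value, (i, j) in obj:
--         if 0 <= i < h and 0 <= j < w:
--             if grid_painted[i][j] == bg:
--                 grid_painted[i][j] = value
--     return tuple(tuple(row) for row in grid_painted)
-- ===== SOURCE B (Python) =====
-- def underpaint(grid, obj):
--     """ paint object to grid where there is background """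
--     h, w = len(grid), len(grid[0])
--     paint = {}
--     for value, (i, j) in obj:
--         if 0 <= i < h and 0 <= j < w and value != 0 and (i, j) not in paint:
--             paint[(i, j)] = value
--     return tuple(tuple(paint[(i, j)] if cell == 0 and (i, j) in paint else cell
--                        for j, cell in enumerate(row))
--                  for i, row in enumerate(grid))
-- ===== Notes on version B (the rewrite author's own statement) =====
-- stated objective: alternative
-- what changed: Instead of mutating a grid copy while scanning obj, B first builds a dict mapping each in-bounds cell to the first non-zero value for it, then produces the result in one pure pass over the grid with a lookup per cell.
import Mathlib
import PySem

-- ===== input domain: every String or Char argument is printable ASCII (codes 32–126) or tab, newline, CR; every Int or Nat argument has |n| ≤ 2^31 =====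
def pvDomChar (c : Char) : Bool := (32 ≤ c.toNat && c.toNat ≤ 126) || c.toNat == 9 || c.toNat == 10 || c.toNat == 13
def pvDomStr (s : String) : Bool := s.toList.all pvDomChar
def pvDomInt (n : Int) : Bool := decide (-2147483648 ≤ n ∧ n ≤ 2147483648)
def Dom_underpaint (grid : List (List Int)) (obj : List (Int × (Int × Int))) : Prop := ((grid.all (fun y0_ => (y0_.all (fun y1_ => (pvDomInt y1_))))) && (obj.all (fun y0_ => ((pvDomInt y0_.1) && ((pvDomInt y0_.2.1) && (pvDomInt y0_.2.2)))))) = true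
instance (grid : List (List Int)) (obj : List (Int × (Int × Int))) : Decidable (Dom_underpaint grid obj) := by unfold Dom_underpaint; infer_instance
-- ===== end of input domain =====

-- B builds a first-non-zero-per-cell dict from obj once, then maps over the grid with a
-- per-cell lookup, instead of A's stateful mutation of a grid copy while scanning obj.

-- ===== PORT A =====
-- one iteration of A's 'for value, (i, j) in obj' loop on the mutable grid copy
def paintStep (h w : Int) (g : List (List Int)) (e : Int × (Int × Int)) : List (List Int) :=
  if 0 ≤ e.2.1 ∧ e.2.1 < h ∧ 0 ≤ e.2.2 ∧ e.2.2 < w then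
    match PySem.List.pyGet? g e.2.1 with
    | some row =>
      match PySem.List.pyGet? row e.2.2 with
      | some x =>
        if x = 0 then PySem.List.pySetD g e.2.1 (PySem.List.pySetD row e.2.2 e.1) else g
      | none => g   -- IndexError in Python (short row); excluded by Pre_
    | none => g
  else g

def underpaint (grid : List (List Int)) (obj : List (Int × (Int × Int))) : List (List Int) :=
  -- len(grid[0]) raises on empty grid; Pre_ requires grid ≠ []
  obj.foldl (paintStep (grid.length : Int) ((grid.headD []).length : Int)) grid

-- ===== PORT B =====
-- B's dict: first non-zero value per in-bounds cell
def buildPaint (h w : Int) (obj : List (Int × (Int × Int))) : PySem.Dict (Int × Int) Int :=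
  obj.foldl (fun d e =>
    if 0 ≤ e.2.1 ∧ e.2.1 < h ∧ 0 ≤ e.2.2 ∧ e.2.2 < w ∧ e.1 ≠ 0 ∧ d.contains (e.2.1, e.2.2) = false
    then d.insert (e.2.1, e.2.2) e.1 else d) PySem.Dict.empty

def underpaint_alt (grid : List (List Int)) (obj : List (Int × (Int × Int))) : List (List Int) :=
  let paint := buildPaint (grid.length : Int) ((grid.headD []).length : Int) obj
  (PySem.List.enumerate grid).map (fun (p : Int × List Int) =>
    (PySem.List.enumerate p.2).map (fun (q : Int × Int) =>
      match paint.get? (p.1, q.1) with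
      | some v => if q.2 = 0 then v else q.2
      | none => q.2))

-- ===== PRECONDITION & SPEC =====
-- Pre_ excludes exactly the inputs where A raises: the empty grid (len(grid[0]) is an
-- IndexError) and ragged grids where some obj entry passes the 0<=i<h, 0<=j<w bounds
-- check but row i is shorter than j+1 (grid_painted[i][j] is an IndexError).
def Pre_underpaint (grid : List (List Int)) (obj : List (Int × (Int × Int))) : Prop :=
  grid ≠ [] ∧ ∀ e ∈ obj,
    (0 ≤ e.2.1 ∧ e.2.1 < (grid.length : Int) ∧ 0 ≤ e.2.2 ∧ e.2.2 < ((grid.headD []).length : Int)) →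
    e.2.2 < ((grid.getD e.2.1.toNat []).length : Int)
instance (grid : List (List Int)) (obj : List (Int × (Int × Int))) : Decidable (Pre_underpaint grid obj) := by unfold Pre_underpaint; infer_instance

def pvWitness_underpaint : List (List Int) × (List (Int × (Int × Int))) :=
  ([[0, 3], [0, 0]], [(5, (0, 0)), (0, (1, 1)), (7, (1, 1)), (9, (0, 1)), (4, (5, 0))])

def Spec_underpaint (grid : List (List Int)) (obj : List (Int × (Int × Int))) (out : List (List Int)) : Prop := out = underpaint_alt grid obj
instance (grid : List (List Int)) (obj : List (Int × (Int × Int))) (out : List (List Int)) : Decidable (Spec_underpaint grid obj out) := by unfold Spec_underpaint; infer_instance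

-- ===== CLAIM (what is proved, stated in full; the proofs are below) =====
def Claim_equal_underpaint : Prop := ∀ (grid : List (List Int)) (obj : List (Int × (Int × Int))), Dom_underpaint grid obj → Pre_underpaint grid obj → Spec_underpaint grid obj (underpaint grid obj)

-- ===== LEMMAS AND PROOFS =====

-- first non-zero painted value for cell (i, j), scanning obj left to right
def firstNZ (h w : Int) (obj : List (Int × (Int × Int))) (i j : Int) : Option Int :=
  obj.findSome? (fun e =>
    if e.2.1 = i ∧ e.2.2 = j ∧ 0 ≤ i ∧ i < h ∧ 0 ≤ j ∧ j < w ∧ e.1 ≠ 0 then some e.1 else none)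

-- the dict built by B answers firstNZ
lemma buildPaint_get? (h w : Int) (obj : List (Int × (Int × Int))) (d : PySem.Dict (Int × Int) Int) (i j : Int) :
    (obj.foldl (fun d e =>
      if 0 ≤ e.2.1 ∧ e.2.1 < h ∧ 0 ≤ e.2.2 ∧ e.2.2 < w ∧ e.1 ≠ 0 ∧ d.contains (e.2.1, e.2.2) = false
      then d.insert (e.2.1, e.2.2) e.1 else d) d).get? (i, j)
    = (d.get? (i, j)).or (firstNZ h w obj i j) := by
  induction obj generalizing d with
  | nil => simp [firstNZ]
  | cons e rest ih =>
    simp only [List.foldl_cons, firstNZ, List.findSome?_cons] at *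
    by_cases hc : 0 ≤ e.2.1 ∧ e.2.1 < h ∧ 0 ≤ e.2.2 ∧ e.2.2 < w ∧ e.1 ≠ 0 ∧ d.contains (e.2.1, e.2.2) = false
    · rw [if_pos hc, ih]
      by_cases hk : ((i, j) : Int × Int) = (e.2.1, e.2.2)
      · have hk' : e.2.1 = i ∧ e.2.2 = j := by
          rw [Prod.ext_iff] at hk; exact ⟨hk.1.symm, hk.2.symm⟩
        obtain ⟨h1, h2⟩ := hk' 
        have hd : d.get? (i, j) = none := by
          rw [PySem.Dict.get?_eq_none_iff_contains]
          rw [h1, h2] at hc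
          exact hc.2.2.2.2.2
        rw [PySem.Dict.get?_insert, if_pos hk, hd]
        have : (e.2.1 = (i : Int) ∧ e.2.2 = (j : Int) ∧ 0 ≤ (i:Int) ∧ (i:Int) < h ∧ 0 ≤ (j:Int) ∧ (j:Int) < w ∧ e.1 ≠ 0) := by
          refine ⟨h1, h2, ?_, ?_, ?_, ?_, hc.2.2.2.2.1⟩
          · rw [← h1]; exact hc.1
          · rw [← h1]; exact hc.2.1
          · rw [← h2]; exact hc.2.2.1
          · rw [← h2]; exact hc.2.2.2.1
        rw [if_pos this]
        simp
      · rw [PySem.Dict.get?_insert, if_neg hk]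
        have : ¬ (e.2.1 = (i : Int) ∧ e.2.2 = (j : Int) ∧ 0 ≤ (i:Int) ∧ (i:Int) < h ∧ 0 ≤ (j:Int) ∧ (j:Int) < w ∧ e.1 ≠ 0) := by
          rintro ⟨ha, hb, -⟩; exact hk (by rw [ha, hb])
        rw [if_neg this]
    · rw [if_neg hc, ih]
      by_cases hq : (e.2.1 = (i : Int) ∧ e.2.2 = (j : Int) ∧ 0 ≤ (i:Int) ∧ (i:Int) < h ∧ 0 ≤ (j:Int) ∧ (j:Int) < w ∧ e.1 ≠ 0)
      · obtain ⟨h1, h2, h3, h4, h5, h6, h7⟩ := hq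
        have hcontains : d.contains (e.2.1, e.2.2) = true := by
          by_contra hne
          exact hc ⟨by omega, by omega, by omega, by omega, h7, by simpa using hne⟩
        have : (d.get? (i, j)).isSome := by
          rw [h1, h2] at hcontains
          rw [← PySem.Dict.contains_eq_isSome_get?]; exact hcontains
        obtain ⟨v, hv⟩ := Option.isSome_iff_exists.mp this
        rw [hv]; simp
      · rw [if_neg hq]

-- one A-step preserves the shape of the grid
lemma paintStep_shape (h w : Int) (g : List (List Int)) (e : Int × (Int × Int)) (k : Nat) :
    (paintStep h w g e).length = g.length ∧
    ((paintStep h w g e).getD k []).length = (g.getD k []).length := by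
  unfold paintStep
  split_ifs with hb
  · rcases hg : PySem.List.pyGet? g e.2.1 with _ | row
    · exact ⟨rfl, rfl⟩
    · simp only []
      rcases hr : PySem.List.pyGet? row e.2.2 with _ | c
      · exact ⟨rfl, rfl⟩
      · simp only []
        split_ifs with hc
        · rw [PySem.List.pySetD_of_nonneg row e.1 hb.2.2.1, PySem.List.pySetD_of_nonneg g _ hb.1]
          have hg2 : g[e.2.1.toNat]? = some row := by
            rw [← PySem.List.pyGet?_of_nonneg g hb.1]; exact hg
          obtain ⟨hlt, hrow⟩ := List.getElem?_eq_some_iff.mp hg2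
          refine ⟨by simp, ?_⟩
          simp only [List.getD, List.getElem?_set]
          by_cases hk : e.2.1.toNat = k
          · subst hk
            rw [if_pos rfl, if_pos hlt]
            simp [List.getElem?_eq_getElem hlt, hrow]
          · rw [if_neg hk]
        · exact ⟨rfl, rfl⟩
  · exact ⟨rfl, rfl⟩

-- cellwise characterisation of A's fold
lemma firstNZ_cons (h w : Int) (e : Int × (Int × Int)) (rest : List (Int × (Int × Int))) (i j : Int) :
    firstNZ h w (e :: rest) i j =
      if (e.2.1 = i ∧ e.2.2 = j ∧ 0 ≤ i ∧ i < h ∧ 0 ≤ j ∧ j < w ∧ e.1 ≠ 0)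
      then some e.1 else firstNZ h w rest i j := by
  simp only [firstNZ, List.findSome?_cons]
  split_ifs <;> rfl

lemma getD_set_eq {α : Type} (l : List α) (n : Nat) (a : α) (d : α) (hlt : n < l.length) (i : Nat) :
    (l.set n a).getD i d = if n = i then a else l.getD i d := by
  simp only [List.getD, List.getElem?_set]
  by_cases hni : n = i
  · subst hni; simp [hlt]
  · simp [hni]

lemma runA_cell (obj : List (Int × (Int × Int))) (h w : Int) (g : List (List Int))
    (hh : h = (g.length : Int))
    (hpre : ∀ e ∈ obj,
      (0 ≤ e.2.1 ∧ e.2.1 < h ∧ 0 ≤ e.2.2 ∧ e.2.2 < w) →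
      e.2.2 < ((g.getD e.2.1.toNat []).length : Int))
    (i j : Nat) :
    ((obj.foldl (paintStep h w) g).getD i []).getD j 0 =
      (if (g.getD i []).getD j 0 = 0
       then (firstNZ h w obj (i : Int) (j : Int)).getD ((g.getD i []).getD j 0)
       else (g.getD i []).getD j 0) := by
  induction obj generalizing g with
  | nil =>
    simp only [List.foldl_nil, firstNZ, List.findSome?_nil, Option.getD_none]
    split_ifs <;> rfl
  | cons e rest ih =>
    simp only [List.foldl_cons]
    have hh' : h = ((paintStep h w g e).length : Int) := by
      rw [(paintStep_shape h w g e 0).1]; exact hh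
    have hpre' : ∀ e' ∈ rest,
        (0 ≤ e'.2.1 ∧ e'.2.1 < h ∧ 0 ≤ e'.2.2 ∧ e'.2.2 < w) →
        e'.2.2 < (((paintStep h w g e).getD e'.2.1.toNat []).length : Int) := by
      intro e' he' hb
      rw [(paintStep_shape h w g e e'.2.1.toNat).2]
      exact hpre e' (List.mem_cons_of_mem _ he') hb
    rw [ih (paintStep h w g e) hh' hpre' ]
    rw [firstNZ_cons]
    by_cases hP : 0 ≤ e.2.1 ∧ e.2.1 < h ∧ 0 ≤ e.2.2 ∧ e.2.2 < w
    · -- bounds check passes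
      have hlt : e.2.1.toNat < g.length := by omega
      have hrowget : PySem.List.pyGet? g e.2.1 = some (g.getD e.2.1.toNat []) := by
        rw [PySem.List.pyGet?_eq_some_getElem g hP.1 (by omega), List.getD_eq_getElem _ _ hlt]
      have hjR : e.2.2 < ((g.getD e.2.1.toNat []).length : Int) := hpre e List.mem_cons_self hP
      have hmlt : e.2.2.toNat < (g.getD e.2.1.toNat []).length := by omega
      have hcell : PySem.List.pyGet? (g.getD e.2.1.toNat []) e.2.2
          = some ((g.getD e.2.1.toNat []).getD e.2.2.toNat 0) := by
        rw [PySem.List.pyGet?_eq_some_getElem _ hP.2.2.1 (by omega), List.getD_eq_getElem _ _ hmlt]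
      by_cases hc : (g.getD e.2.1.toNat []).getD e.2.2.toNat 0 = 0
      · -- the scanned cell is background: A paints it
        have hg' : paintStep h w g e
            = g.set e.2.1.toNat ((g.getD e.2.1.toNat []).set e.2.2.toNat e.1) := by
          unfold paintStep
          rw [if_pos hP]
          simp only [hrowget, hcell]
          rw [if_pos hc, PySem.List.pySetD_of_nonneg _ e.1 hP.2.2.1,
            PySem.List.pySetD_of_nonneg g _ hP.1]
        rw [hg', getD_set_eq _ _ _ _ hlt]
        by_cases hni : e.2.1.toNat = i
        · rw [if_pos hni]
          rw [hni] at hmlt hc ⊢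
          rw [getD_set_eq _ _ _ _ hmlt]
          by_cases hmj : e.2.2.toNat = j
          · rw [if_pos hmj]
            rw [hmj] at hc
            by_cases hv : e.1 = 0
            · rw [if_pos hv, hv, if_pos hc, hc]
              simp
            · rw [if_neg hv, if_pos hc]
              have hQ : (e.2.1 = (i : Int) ∧ e.2.2 = (j : Int) ∧ 0 ≤ (i:Int) ∧ (i:Int) < h ∧ 0 ≤ (j:Int) ∧ (j:Int) < w ∧ e.1 ≠ 0) :=
                ⟨by omega, by omega, by omega, by omega, by omega, by omega, hv⟩
              rw [if_pos hQ]
              simp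
          · rw [if_neg hmj]
            have hQ : ¬ (e.2.1 = (i : Int) ∧ e.2.2 = (j : Int) ∧ 0 ≤ (i:Int) ∧ (i:Int) < h ∧ 0 ≤ (j:Int) ∧ (j:Int) < w ∧ e.1 ≠ 0) := by
              rintro ⟨-, q2, -⟩; exact hmj (by omega)
            rw [if_neg hQ]
        · rw [if_neg hni]
          have hQ : ¬ (e.2.1 = (i : Int) ∧ e.2.2 = (j : Int) ∧ 0 ≤ (i:Int) ∧ (i:Int) < h ∧ 0 ≤ (j:Int) ∧ (j:Int) < w ∧ e.1 ≠ 0) := by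
            rintro ⟨q1, -⟩; exact hni (by omega)
          rw [if_neg hQ]
      · -- the scanned cell is already non-background: A leaves the grid unchanged
        have hg' : paintStep h w g e = g := by
          unfold paintStep
          rw [if_pos hP]
          simp only [hrowget, hcell]
          rw [if_neg hc]
        rw [hg']
        by_cases hQ : (e.2.1 = (i : Int) ∧ e.2.2 = (j : Int) ∧ 0 ≤ (i:Int) ∧ (i:Int) < h ∧ 0 ≤ (j:Int) ∧ (j:Int) < w ∧ e.1 ≠ 0)
        · obtain ⟨q1, q2, -⟩ := hQ
          have hX : ¬ ((g.getD i []).getD j 0 = 0) := by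
            have h1 : e.2.1.toNat = i := by omega
            have h2 : e.2.2.toNat = j := by omega
            rw [← h1, ← h2]; exact hc
          rw [if_neg hX, if_neg hX]
        · rw [if_neg hQ]
    · -- bounds check fails: the step is a no-op and e never matches firstNZ
      have hg' : paintStep h w g e = g := by unfold paintStep; rw [if_neg hP]
      have hQ : ¬ (e.2.1 = (i : Int) ∧ e.2.2 = (j : Int) ∧ 0 ≤ (i:Int) ∧ (i:Int) < h ∧ 0 ≤ (j:Int) ∧ (j:Int) < w ∧ e.1 ≠ 0) := by
        rintro ⟨q1, q2, q3, q4, q5, q6, q7⟩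
        exact hP ⟨by omega, by omega, by omega, by omega⟩
      rw [hg', if_neg hQ]

lemma runA_shape (h w : Int) (obj : List (Int × (Int × Int))) (g : List (List Int)) (k : Nat) :
    (obj.foldl (paintStep h w) g).length = g.length ∧
    ((obj.foldl (paintStep h w) g).getD k []).length = (g.getD k []).length := by
  induction obj generalizing g with
  | nil => exact ⟨rfl, rfl⟩
  | cons e rest ih =>
    simp only [List.foldl_cons]
    obtain ⟨hl, hr⟩ := ih (paintStep h w g e)
    obtain ⟨hl', hr'⟩ := paintStep_shape h w g e k
    exact ⟨hl.trans hl', hr.trans hr'⟩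

lemma buildPaint_get?_eq (h w : Int) (obj : List (Int × (Int × Int))) (i j : Int) :
    (buildPaint h w obj).get? (i, j) = firstNZ h w obj i j := by
  unfold buildPaint
  rw [buildPaint_get?]
  simp [PySem.Dict.get?_empty]

-- ===== VERDICT (by name: the statement is the Claim_ definition above) =====
theorem underpaint_spec : Claim_equal_underpaint := by
  unfold Claim_equal_underpaint
  intro grid obj _hdom hpre
  obtain ⟨-, hpre2⟩ := hpre
  unfold Spec_underpaint underpaint underpaint_alt
  dsimp only
  have hlen : (obj.foldl (paintStep (grid.length : Int) ((grid.headD []).length : Int)) grid).length = grid.length :=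
    (runA_shape _ _ obj grid 0).1
  have hrowlen : ∀ k : Nat,
      ((obj.foldl (paintStep (grid.length : Int) ((grid.headD []).length : Int)) grid).getD k []).length
        = (grid.getD k []).length :=
    fun k => (runA_shape _ _ obj grid k).2
  apply List.ext_getElem?
  intro i
  by_cases hi : i < grid.length
  · rw [List.getElem?_eq_getElem (by rw [hlen]; exact hi),
      List.getElem?_eq_getElem (by simpa [PySem.List.length_enumerate] using hi)]
    simp only [List.getElem_map, PySem.List.getElem_enumerate, zero_add]
    refine congrArg some ?_
    apply List.ext_getElem?
    intro j
    have hrl : ((obj.foldl (paintStep (grid.length : Int) ((grid.headD []).length : Int)) grid)[i]'(by rw [hlen]; exact hi)).length = (grid[i]'hi).length := by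
      rw [← List.getD_eq_getElem _ [] (by rw [hlen]; exact hi), hrowlen i, List.getD_eq_getElem _ _ hi]
    by_cases hj : j < (grid[i]'hi).length
    · rw [List.getElem?_eq_getElem (by rw [hrl]; exact hj),
        List.getElem?_eq_getElem (by simpa [PySem.List.length_enumerate] using hj)]
      simp only [List.getElem_map, PySem.List.getElem_enumerate, zero_add]
      refine congrArg some ?_
      have hcell := runA_cell obj (grid.length : Int) ((grid.headD []).length : Int) grid rfl hpre2 i j
      rw [List.getD_eq_getElem grid [] hi] at hcell
      rw [List.getD_eq_getElem (grid[i]'hi) 0 hj] at hcell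
      rw [List.getD_eq_getElem
        (obj.foldl (paintStep (grid.length : Int) ((grid.headD []).length : Int)) grid) []
        (by rw [hlen]; exact hi)] at hcell
      rw [List.getD_eq_getElem _ 0 (by rw [hrl]; exact hj)] at hcell
      rw [hcell, buildPaint_get?_eq]
      rcases firstNZ (grid.length : Int) ((grid.headD []).length : Int) obj (i : Int) (j : Int) with _ | v
      · simp
      · by_cases hx : (grid[i]'hi)[j]'hj = 0
        · simp [hx]
        · simp [hx]
    · rw [List.getElem?_eq_none (by rw [hrl]; omega),
        List.getElem?_eq_none (by simp only [List.length_map, PySem.List.length_enumerate]; omega)]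
  · rw [List.getElem?_eq_none (by rw [hlen]; omega),
      List.getElem?_eq_none (by simp only [List.length_map, PySem.List.length_enumerate]; omega)]
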